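-- pv_equiv track=rewrite | github.com/sueszli/vector-database-benchmark | dataset/python-mutated/event_search.py | translate_escape_sequences
-- ===== SOURCE A (Python) =====
-- def translate_escape_sequences(string: str) -> str:
--     if False:
--         i = 10
--         return i + 15
--     '\n    A non-wildcard pattern can contain escape sequences that we need to handle.\n    - \\* because a single asterisk represents a wildcard, so it needs to be escaped\n    '
--     (i, n) = (0, len(string))
--     res = ''
--     while i < n:
--         c = string[i]
--         i = i + 1
--         if c == '\\' and i < n:
--             d = string[i]
--             if d == '*':
--                 i += 1
--                 res += d
--             else:
--                 res += c
--         else: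
--             res += c
--     return res
-- ===== SOURCE B (Python) =====
-- def translate_escape_sequences(string: str) -> str:
--     return string.replace("\\*", "*")
-- ===== Notes on version B (the rewrite author's own statement) =====
-- stated objective: faster
-- what changed: Replaced the manual index-based while loop with character-by-character string concatenation by a single builtin str.replace call that unescapes backslash-asterisk to asterisk.
import Mathlib
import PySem

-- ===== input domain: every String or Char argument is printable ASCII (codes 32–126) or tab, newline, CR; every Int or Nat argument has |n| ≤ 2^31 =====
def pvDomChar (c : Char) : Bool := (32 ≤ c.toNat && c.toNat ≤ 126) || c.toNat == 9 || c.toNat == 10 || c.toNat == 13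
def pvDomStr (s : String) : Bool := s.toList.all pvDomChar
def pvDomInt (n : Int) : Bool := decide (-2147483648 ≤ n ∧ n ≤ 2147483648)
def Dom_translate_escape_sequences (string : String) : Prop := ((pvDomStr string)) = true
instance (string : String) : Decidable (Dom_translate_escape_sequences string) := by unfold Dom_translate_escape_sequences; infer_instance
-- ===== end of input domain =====

-- B replaces A's index-based while loop with one builtin call string.replace("\*", "*"); return values proved equal on all inputs.

-- ===== PORT A =====
-- A's while loop over index i: i only advances by 1 or 2, so it is the obvious
-- structural recursion on the remaining characters; 'res += ...' becomes consing
-- the emitted character onto the translation of the rest.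
def translateA : List Char → List Char
  | [] => []                                   -- i = n: loop ends, return res
  | [c] => [c]                                 -- last char: 'c == \\ and i < n' is false either way, res += c
  | c :: d :: rest =>
      if c = '\\' then                        -- d = string[i] exists
        if d = '*' then d :: translateA rest               -- i += 1; res += d
        else c :: translateA (d :: rest)                   -- res += c (d not consumed)
      else c :: translateA (d :: rest)         -- res += c

def translate_escape_sequences (string : String) : String :=
  String.ofList (translateA string.toList)

-- ===== PORT B =====
def translate_escape_sequences_alt (string : String) : String :=
  PySem.Str.replace string "\\*" "*"

-- ===== PRECONDITION & SPEC =====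
def Spec_translate_escape_sequences (string : String) (out : String) : Prop := out = translate_escape_sequences_alt string
instance (string : String) (out : String) : Decidable (Spec_translate_escape_sequences string out) := by unfold Spec_translate_escape_sequences; infer_instance

-- ===== CLAIM (what is proved, stated in full; the proofs are below) =====
def Claim_equal_translate_escape_sequences : Prop := ∀ (string : String), Dom_translate_escape_sequences string → Spec_translate_escape_sequences string (translate_escape_sequences string)

-- ===== LEMMAS AND PROOFS =====

theorem replace_go_eq_translateA (fuel : Nat) :
    ∀ (l acc : List Char), l.length ≤ fuel →
      PySem.Chars.replace.go ['\\', '*'] ['*'] fuel l acc = acc.reverse ++ translateA l := by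
  induction fuel with
  | zero =>
      intro l acc h
      have hl : l = [] := List.eq_nil_of_length_eq_zero (Nat.le_zero.mp h)
      subst hl
      simp [PySem.Chars.replace.go, translateA]
  | succ fuel ih =>
      intro l acc h
      match l with
      | [] => simp [PySem.Chars.replace.go, translateA]
      | c :: t =>
          rw [PySem.Chars.replace.go]
          by_cases hpre : List.isPrefixOf ['\\', '*'] (c :: t) = true
          · cases t with
            | nil => simp [List.isPrefixOf] at hpre
            | cons d t' =>
                obtain ⟨hc, hd⟩ : '\\' = c ∧ '*' = d := by
                  simpa [List.isPrefixOf] using hpre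
                subst hc; subst hd
                rw [if_pos hpre]
                have ht' : t'.length ≤ fuel := by simp at h; omega
                rw [show List.drop (['\\', '*'] : List Char).length ('\\' :: '*' :: t') = t' from rfl]
                rw [ih t' _ ht']
                simp [translateA]
          · rw [if_neg hpre]
            have ht : t.length ≤ fuel := by simp at h; omega
            rw [ih t (c :: acc) ht]
            cases t with
            | nil => simp [translateA]
            | cons d t' =>
                by_cases hc : c = '\\'
                · subst hc
                  have hd : d ≠ '*' := by
                    intro hd; subst hd
                    exact hpre (by simp [List.isPrefixOf])
                  simp [translateA, hd]
                · simp [translateA, hc]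

theorem translateA_eq_replace (l : List Char) :
    translateA l = PySem.Chars.replace l ['\\', '*'] ['*'] := by
  rw [PySem.Chars.replace]
  rw [if_neg (by simp)]
  rw [replace_go_eq_translateA l.length l [] (le_refl _)]
  simp

-- ===== VERDICT (by name: the statement is the Claim_ definition above) =====
theorem translate_escape_sequences_spec : Claim_equal_translate_escape_sequences := by
  intro s _
  unfold Spec_translate_escape_sequences translate_escape_sequences translate_escape_sequences_alt
  rw [PySem.Str.replace]
  have : ("\\*" : String).toList = ['\\', '*'] := by decide
  rw [this]
  have h2 : ("*" : String).toList = ['*'] := by decide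
  rw [h2, translateA_eq_replace]
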